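-- pv_equiv track=rewrite | github.com/Fusyong/youdaoocr | ocr_to_markdown.py | _merge_list_items
-- ===== SOURCE A (Python) =====
-- from typing import Dict, List, Any, Tuple
--
-- def _merge_list_items(lines: List[str]) -> List[str]:
--     """合并连续的列表项"""
--     if not lines:
--         return lines
--
--     merged_lines = []
--     i = 0
--
--     while i < len(lines):
--         current_line = lines[i]
--
--         # 检查是否为列表项
--         if current_line.startswith('- '):
--             # 收集连续的列表项
--             list_items = [current_line[2:]]  # 去掉 "- " 前缀
--             i += 1
--
--             # 查找连续的列表项
--             while i < len(lines) and lines[i].startswith('- '):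
--                 list_items.append(lines[i][2:])
--                 i += 1
--
--             # 合并列表项
--             if len(list_items) > 1:
--                 merged_lines.append('- ' + '\n- '.join(list_items))
--             else:
--                 merged_lines.append(current_line)
--         else:
--             merged_lines.append(current_line)
--             i += 1
--
--     return merged_lines
-- ===== SOURCE B (Python) =====
-- from typing import List
--
-- def _merge_list_items(lines: List[str]) -> List[str]:
--     """Merge consecutive list items in a single forward pass: a list line is
--     folded into the previous output line when that line is (the start of) a
--     list block; no inner loop, no index bookkeeping."""
--     merged: List[str] = []
--     for line in lines:
--         if line.startswith('- ') and merged and merged[-1].startswith('- '):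
--             merged[-1] += '\n' + line
--         else:
--             merged.append(line)
--     return merged
-- ===== Notes on version B (the rewrite author's own statement) =====
-- stated objective: simpler
-- what changed: Replaced the index-driven while loop with a nested collect-and-join inner loop and a length-1 special case by a single forward pass that folds each consecutive list line into the previous output block (merged[-1] += '\n' + line), with no index bookkeeping, no inner loop and no join.
import Mathlib
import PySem

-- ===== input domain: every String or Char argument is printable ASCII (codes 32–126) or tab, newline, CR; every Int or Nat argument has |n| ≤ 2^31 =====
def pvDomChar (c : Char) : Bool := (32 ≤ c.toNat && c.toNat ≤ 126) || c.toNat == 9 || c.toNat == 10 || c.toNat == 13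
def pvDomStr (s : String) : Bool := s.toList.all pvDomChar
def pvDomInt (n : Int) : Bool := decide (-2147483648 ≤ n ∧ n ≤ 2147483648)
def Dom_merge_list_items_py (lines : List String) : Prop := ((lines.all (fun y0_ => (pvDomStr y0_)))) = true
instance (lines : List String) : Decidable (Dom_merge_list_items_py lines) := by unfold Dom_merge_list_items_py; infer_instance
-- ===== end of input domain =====

-- B replaces A's index-driven while loop (with its inner collect loop, join and length-1
-- special case) by a single forward pass that folds each consecutive list line into the
-- previous output block; same return value, objective: simpler.

-- ===== PORT A =====
-- inner 'while i < len(lines) and lines[i].startswith("- ")' loop: collects lines[i][2:] and returns the remainder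
def pvCollect : List String → List String × List String
  | [] => ([], [])
  | x :: xs =>
    if PySem.Str.startswith x "- " then
      let p := pvCollect xs
      (PySem.Str.slice x (some 2) none :: p.1, p.2)
    else ([], x :: xs)

theorem pvCollect_snd_le (xs : List String) : (pvCollect xs).2.length ≤ xs.length := by
  induction xs with
  | nil => simp [pvCollect]
  | cons x xs ih =>
    by_cases h : PySem.Str.startswith x "- " = true
    · simp only [pvCollect, if_pos h]
      exact Nat.le_succ_of_le ih
    · simp only [pvCollect, if_neg h]
      simp

def merge_list_items_py (lines : List String) : List String :=
  match lines with
  | [] => []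
  | l :: rest =>
    if PySem.Str.startswith l "- " then
      let p := pvCollect rest
      -- list_items = [current_line[2:]] ++ collected items
      let items := PySem.Str.slice l (some 2) none :: p.1
      (if items.length > 1 then "- " ++ PySem.Str.join "\n- " items else l)
        :: merge_list_items_py p.2
    else
      l :: merge_list_items_py rest
termination_by lines.length
decreasing_by
  · exact Nat.lt_succ_of_le (pvCollect_snd_le rest)
  · simp

-- ===== PORT B =====
-- one step of B's forward pass; the accumulator is Python's `merged` kept reversed (head = merged[-1])
def pvStep (acc : List String) (line : String) : List String :=
  match acc with
  | last :: rest =>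
    if PySem.Str.startswith line "- " && PySem.Str.startswith last "- " then
      (last ++ "\n" ++ line) :: rest
    else
      line :: last :: rest
  | [] => [line]

def merge_list_items_py_alt (lines : List String) : List String :=
  (lines.foldl pvStep []).reverse

-- ===== PRECONDITION & SPEC =====
def Spec_merge_list_items_py (lines : List String) (out : List String) : Prop := out = merge_list_items_py_alt lines
instance (lines : List String) (out : List String) : Decidable (Spec_merge_list_items_py lines out) := by unfold Spec_merge_list_items_py; infer_instance

-- ===== CLAIM (what is proved, stated in full; the proofs are below) =====
def Claim_equal_merge_list_items_py : Prop := ∀ (lines : List String), Dom_merge_list_items_py lines → Spec_merge_list_items_py lines (merge_list_items_py lines)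

-- ===== LEMMAS AND PROOFS =====

-- proof-side: the string B's pass builds up for a run of list lines
def pvMergeStr (b : String) (run : List String) : String :=
  run.foldl (fun acc r => acc ++ "\n" ++ r) b

theorem pv_item_iff (l : String) :
    PySem.Str.startswith l "- " = true ↔ ∃ t, l.toList = '-' :: ' ' :: t := by
  rw [PySem.Str.startswith_eq]
  simp only [PySem.Chars.startswith]
  constructor
  · intro h
    have hp : ("- ".toList) <+: l.toList := List.isPrefixOf_iff_prefix.mp h
    obtain ⟨t, ht⟩ := hp
    exact ⟨t, by simpa using ht.symm⟩
  · rintro ⟨t, ht⟩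
    apply List.isPrefixOf_iff_prefix.mpr
    rw [ht]
    exact ⟨t, by simp⟩

theorem pv_listSlice2 (cs : List Char) : PySem.List.slice cs (some 2) none = cs.drop 2 := by
  rw [show ((2:Int)) = ((2:Nat):Int) by norm_num, PySem.List.slice_from_natCast]

theorem pv_item_append (b s : String) (h : PySem.Str.startswith b "- " = true) :
    PySem.Str.startswith (b ++ s) "- " = true := by
  obtain ⟨t, ht⟩ := (pv_item_iff b).mp h
  exact (pv_item_iff _).mpr ⟨t ++ s.toList, by simp [ht]⟩

-- B's pass ignores everything below the top of the accumulator
theorem pv_foldl_append (xs : List String) : ∀ (a : String) (t acc2 : List String),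
    List.foldl pvStep ((a :: t) ++ acc2) xs = List.foldl pvStep (a :: t) xs ++ acc2 := by
  induction xs with
  | nil => intro a t acc2; rfl
  | cons x xs ih =>
    intro a t acc2
    by_cases h : (PySem.Str.startswith x "- " && PySem.Str.startswith a "- ") = true
    · simp only [List.foldl_cons, pvStep, List.cons_append, h, if_pos]
      exact ih _ _ _
    · simp only [List.foldl_cons, pvStep, List.cons_append, h, if_neg, Bool.not_eq_true]
      exact ih x (a :: t) acc2

-- when the next line does not merge with the top, the top is frozen
theorem pv_foldl_frozen (a : String) (xs : List String)
    (h : xs = [] ∨ ∃ y t, xs = y :: t ∧ (PySem.Str.startswith y "- " && PySem.Str.startswith a "- ") = false) :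
    List.foldl pvStep [a] xs = List.foldl pvStep [] xs ++ [a] := by
  rcases h with h | ⟨y, t, rfl, hy⟩
  · subst h; rfl
  · have h1 : pvStep [a] y = y :: [a] := by
      simp only [pvStep, hy]
      simp
    have h2 : pvStep [] y = [y] := rfl
    simp only [List.foldl_cons, h1, h2]
    exact pv_foldl_append t y [] [a]

-- a run of consecutive list lines is absorbed into the top of the accumulator
theorem pv_run_absorb : ∀ (run : List String) (b : String) (acc tail : List String),
    PySem.Str.startswith b "- " = true →
    (∀ r ∈ run, PySem.Str.startswith r "- " = true) →
    List.foldl pvStep (b :: acc) (run ++ tail) = List.foldl pvStep (pvMergeStr b run :: acc) tail := by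
  intro run
  induction run with
  | nil => intro b acc tail _ _; rfl
  | cons r rs ih =>
    intro b acc tail hb hrun
    have hr : PySem.Str.startswith r "- " = true := hrun r (by simp)
    have hstep : pvStep (b :: acc) r = (b ++ "\n" ++ r) :: acc := by
      simp only [pvStep, hb, hr]
      simp
    have hb' : PySem.Str.startswith (b ++ "\n" ++ r) "- " = true :=
      pv_item_append _ _ (pv_item_append _ _ hb)
    simp only [List.cons_append, List.foldl_cons, hstep]
    have := ih (b ++ "\n" ++ r) acc tail hb' (fun x hx => hrun x (by simp [hx]))
    simpa [pvMergeStr] using this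

-- B's folded string equals A's '- ' + '\n- '.join(items)
theorem pv_merge_join : ∀ (run : List String) (l : String),
    PySem.Str.startswith l "- " = true →
    (∀ r ∈ run, PySem.Str.startswith r "- " = true) →
    pvMergeStr l run =
      "- " ++ PySem.Str.join "\n- "
        (PySem.Str.slice l (some 2) none :: run.map (fun r => PySem.Str.slice r (some 2) none)) := by
  intro run
  induction run with
  | nil =>
    intro l hl _
    apply String.toList_inj.mp
    obtain ⟨t, ht⟩ := (pv_item_iff l).mp hl
    simp [pvMergeStr, PySem.Str.toList_join, PySem.Chars.join_singleton, pv_listSlice2, ht]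
  | cons r rs ih =>
    intro l hl hrun
    have hr : PySem.Str.startswith r "- " = true := hrun r (by simp)
    have hl' : PySem.Str.startswith (l ++ "\n" ++ r) "- " = true :=
      pv_item_append _ _ (pv_item_append _ _ hl)
    have hMerge : pvMergeStr l (r :: rs) = pvMergeStr (l ++ "\n" ++ r) rs := by
      simp [pvMergeStr]
    rw [hMerge, ih (l ++ "\n" ++ r) hl' (fun x hx => hrun x (by simp [hx]))]
    apply String.toList_inj.mp
    obtain ⟨tl, htl⟩ := (pv_item_iff l).mp hl
    obtain ⟨tr, htr⟩ := (pv_item_iff r).mp hr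
    cases rs with
    | nil =>
      simp [PySem.Str.toList_join, PySem.Chars.join_singleton, PySem.Chars.join_cons_cons,
            pv_listSlice2, htl, htr]
    | cons y ys =>
      simp [PySem.Str.toList_join, PySem.Chars.join_cons_cons, pv_listSlice2, htl, htr]

-- shape of A's inner collect loop: it splits off the maximal run of list lines
theorem pvCollect_spec (rest : List String) :
    ∃ run, (∀ r ∈ run, PySem.Str.startswith r "- " = true) ∧
      rest = run ++ (pvCollect rest).2 ∧
      (pvCollect rest).1 = run.map (fun r => PySem.Str.slice r (some 2) none) ∧
      ((pvCollect rest).2 = [] ∨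
        ∃ y t, (pvCollect rest).2 = y :: t ∧ PySem.Str.startswith y "- " = false) := by
  induction rest with
  | nil => exact ⟨[], by simp [pvCollect]⟩
  | cons x xs ih =>
    by_cases hx : PySem.Str.startswith x "- " = true
    · obtain ⟨run, hrun, heq, hfst, hsnd⟩ := ih
      refine ⟨x :: run, ?_, ?_, ?_, ?_⟩
      · intro r hr
        rcases List.mem_cons.mp hr with rfl | hr
        · exact hx
        · exact hrun r hr
      · simp only [pvCollect, if_pos hx]
        simpa using heq
      · simp only [pvCollect, if_pos hx]
        simpa using hfst
      · simp only [pvCollect, if_pos hx]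
        exact hsnd
    · refine ⟨[], by simp, ?_, ?_, ?_⟩
      · simp only [pvCollect, if_neg hx, List.nil_append]
      · simp only [pvCollect, if_neg hx, List.map_nil]
      · exact Or.inr ⟨x, xs, by simp only [pvCollect, if_neg hx], Bool.eq_false_iff.mpr hx⟩

theorem pv_main : ∀ (n : Nat) (lines : List String), lines.length ≤ n →
    merge_list_items_py lines = (List.foldl pvStep [] lines).reverse := by
  intro n
  induction n with
  | zero =>
    intro lines h
    have : lines = [] := List.eq_nil_of_length_eq_zero (Nat.le_zero.mp h)
    subst this
    simp [merge_list_items_py]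
  | succ n ih =>
    intro lines hlen
    cases lines with
    | nil => simp [merge_list_items_py]
    | cons l rest =>
      have hrest : rest.length ≤ n := Nat.lt_succ_iff.mp (by simpa using hlen)
      by_cases hl : PySem.Str.startswith l "- " = true
      · obtain ⟨run, hrun, heq, hfst, hsnd⟩ := pvCollect_spec rest
        -- A's head string equals B's folded string
        have hM :
            (if (PySem.Str.slice l (some 2) none :: (pvCollect rest).1).length > 1
              then "- " ++ PySem.Str.join "\n- " (PySem.Str.slice l (some 2) none :: (pvCollect rest).1)
              else l) = pvMergeStr l run := by
          cases run with
          | nil =>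
            simp only [hfst]
            simp [pvMergeStr]
          | cons r rs =>
            rw [if_pos (by simp [hfst])]
            rw [hfst, pv_merge_join (r :: rs) l hl hrun]
        -- B side
        have hB : List.foldl pvStep [] (l :: rest)
            = List.foldl pvStep [] (pvCollect rest).2 ++ [pvMergeStr l run] := by
          have h1 : List.foldl pvStep [] (l :: rest) = List.foldl pvStep [l] rest := rfl
          have h2 : List.foldl pvStep [l] rest
              = List.foldl pvStep [pvMergeStr l run] (pvCollect rest).2 := by
            conv_lhs => rw [heq]
            exact pv_run_absorb run l [] (pvCollect rest).2 hl hrun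
          rw [h1, h2]
          apply pv_foldl_frozen
          rcases hsnd with h | ⟨y, t, hyt, hy⟩
          · exact Or.inl h
          · exact Or.inr ⟨y, t, hyt, by rw [hy, Bool.false_and]⟩
        have hlen2 : (pvCollect rest).2.length ≤ n :=
          le_trans (pvCollect_snd_le rest) hrest
        rw [show merge_list_items_py (l :: rest)
              = (if (PySem.Str.slice l (some 2) none :: (pvCollect rest).1).length > 1
                  then "- " ++ PySem.Str.join "\n- " (PySem.Str.slice l (some 2) none :: (pvCollect rest).1)
                  else l) :: merge_list_items_py (pvCollect rest).2 by
              simp only [merge_list_items_py, if_pos hl]]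
        rw [hM, hB, ih _ hlen2]
        simp
      · have hA : merge_list_items_py (l :: rest) = l :: merge_list_items_py rest := by
          simp only [merge_list_items_py, hl]
          simp
        have hB : List.foldl pvStep [] (l :: rest)
            = List.foldl pvStep [] rest ++ [l] := by
          have h1 : List.foldl pvStep [] (l :: rest) = List.foldl pvStep [l] rest := rfl
          rw [h1]
          apply pv_foldl_frozen
          cases rest with
          | nil => exact Or.inl rfl
          | cons y t =>
            exact Or.inr ⟨y, t, rfl, by rw [Bool.eq_false_iff.mpr hl, Bool.and_false]⟩
        rw [hA, hB, ih rest hrest]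
        simp

-- ===== VERDICT (by name: the statement is the Claim_ definition above) =====
theorem merge_list_items_py_spec : Claim_equal_merge_list_items_py := by
  intro lines _
  unfold Spec_merge_list_items_py merge_list_items_py_alt
  exact pv_main lines.length lines (Nat.le_refl _)
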